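-- pv_equiv track=rewrite | github.com/franba94/algoritmos | p2.py | filas_ordenadas
-- ===== SOURCE A (Python) =====
-- def ordenados(s:list) -> bool:
--    res:bool = True
--    for i in range(len(s)-1):
--        if s[i] > s[i+1]:
--            res = False
--    return res
--
-- def filas_ordenadas(matriz:list) -> list:
--     res: list[bool] = []
--     for fila in matriz:
--         if ordenados(fila) == True:
--             res.append(True)
--         else:
--             res.append(False)
--     return res
-- ===== SOURCE B (Python) =====
-- def filas_ordenadas(matriz: list) -> list:
--     return [fila == sorted(fila) for fila in matriz]
-- ===== Notes on version B (the rewrite author's own statement) =====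
-- stated objective: simpler
-- what changed: Replaces the adjacent-pair index scan with a helper flag by a one-line comprehension comparing each row to its sorted copy.
import Mathlib
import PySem

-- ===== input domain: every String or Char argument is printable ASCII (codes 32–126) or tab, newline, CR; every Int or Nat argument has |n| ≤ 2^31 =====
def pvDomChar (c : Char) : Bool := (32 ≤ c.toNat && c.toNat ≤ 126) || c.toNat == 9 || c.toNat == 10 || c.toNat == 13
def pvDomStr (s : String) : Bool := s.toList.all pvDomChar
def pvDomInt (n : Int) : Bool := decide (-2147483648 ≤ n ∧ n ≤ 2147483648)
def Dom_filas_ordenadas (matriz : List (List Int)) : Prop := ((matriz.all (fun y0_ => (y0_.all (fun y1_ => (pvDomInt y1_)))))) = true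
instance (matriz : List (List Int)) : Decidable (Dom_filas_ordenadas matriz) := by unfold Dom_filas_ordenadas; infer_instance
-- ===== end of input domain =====

-- B replaces A's adjacent-pair index scan (with a flag helper) by comparing each row to its sorted copy; objective: simpler.

-- ===== PORT A =====
-- helper 'ordenados': flag res; for i in range(len(s)-1): if s[i] > s[i+1]: res = False
def ordenados (s : List Int) : Bool :=
  (PySem.List.pyRange 0 ((s.length : Int) - 1) 1).foldl
    (fun res i => if PySem.List.pyGetD s i 0 > PySem.List.pyGetD s (i + 1) 0 then false else res)
    true

def filas_ordenadas (matriz : List (List Int)) : List Bool :=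
  matriz.foldl (fun res fila => res ++ [if ordenados fila = true then true else false]) []

-- ===== PORT B =====
def filas_ordenadas_alt (matriz : List (List Int)) : List Bool :=
  matriz.map (fun fila => decide (fila = PySem.List.sorted fila (fun x => x)))

-- ===== PRECONDITION & SPEC =====
def Spec_filas_ordenadas (matriz : List (List Int)) (out : List Bool) : Prop := out = filas_ordenadas_alt matriz
instance (matriz : List (List Int)) (out : List Bool) : Decidable (Spec_filas_ordenadas matriz out) := by unfold Spec_filas_ordenadas; infer_instance

-- ===== CLAIM (what is proved, stated in full; the proofs are below) =====
def Claim_equal_filas_ordenadas : Prop := ∀ (matriz : List (List Int)), Dom_filas_ordenadas matriz → Spec_filas_ordenadas matriz (filas_ordenadas matriz)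

-- ===== LEMMAS AND PROOFS =====

theorem foldl_flag (s : List Int) (l : List Int) (acc : Bool) :
    l.foldl (fun res i => if PySem.List.pyGetD s i 0 > PySem.List.pyGetD s (i + 1) 0 then false else res) acc
      = (acc && l.all (fun i => decide (PySem.List.pyGetD s i 0 ≤ PySem.List.pyGetD s (i + 1) 0))) := by
  induction l generalizing acc with
  | nil => simp
  | cons hd tl ih =>
      simp only [List.foldl_cons, List.all_cons, ih]
      by_cases h : PySem.List.pyGetD s hd 0 > PySem.List.pyGetD s (hd + 1) 0
      · simp [h, not_le.mpr h]
      · simp [h, not_lt.mp h]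

theorem foldl_append_map (f : List Int → Bool) (l : List (List Int)) (acc : List Bool) :
    l.foldl (fun r x => r ++ [f x]) acc = acc ++ l.map f := by
  induction l generalizing acc with
  | nil => simp
  | cons hd tl ih => simp [ih]

theorem ordenados_iff (s : List Int) : ordenados s = true ↔ s.Pairwise (· ≤ ·) := by
  unfold ordenados
  rw [foldl_flag, Bool.true_and, ← List.isChain_iff_pairwise, List.isChain_iff_getElem]
  simp only [List.all_eq_true, PySem.List.mem_pyRange_one, decide_eq_true_eq]
  constructor
  · intro h i hi
    have h0 : (0 : Int) ≤ (i : Int) := by positivity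
    have h1 : (i : Int) < (s.length : Int) - 1 := by omega
    have := h (i : Int) ⟨h0, h1⟩
    rw [PySem.List.pyGetD_eq_getElem s 0 h0 (by omega),
        PySem.List.pyGetD_eq_getElem s 0 (by omega) (by omega)] at this
    convert this using 2 <;> omega
  · intro h i ⟨h0, h1⟩
    have hlt : i.toNat + 1 < s.length := by omega
    rw [PySem.List.pyGetD_eq_getElem s 0 h0 (by omega),
        PySem.List.pyGetD_eq_getElem s 0 (by omega) (by omega)]
    have := h i.toNat (by omega)
    convert this using 2 <;> omega

theorem ordenados_eq_sorted (s : List Int) :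
    ordenados s = decide (s = PySem.List.sorted s (fun x => x)) := by
  by_cases h : s.Pairwise (· ≤ ·)
  · rw [(ordenados_iff s).mpr h, PySem.List.sorted_eq_self_of_pairwise s (fun x => x) h]
    simp
  · have hs : s ≠ PySem.List.sorted s (fun x => x) := by
      intro he
      exact h (he ▸ PySem.List.sorted_pairwise s (fun x => x))
    rw [decide_eq_false hs]
    by_contra hc
    exact h ((ordenados_iff s).mp (by revert hc; cases ordenados s <;> simp))

-- ===== VERDICT (by name: the statement is the Claim_ definition above) =====
theorem filas_ordenadas_spec : Claim_equal_filas_ordenadas := by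
  intro matriz _
  unfold Spec_filas_ordenadas filas_ordenadas filas_ordenadas_alt
  rw [foldl_append_map]
  simp only [List.nil_append]
  apply List.map_congr_left
  intro fila _
  rw [ordenados_eq_sorted fila]
  cases hb : decide (fila = PySem.List.sorted fila (fun x => x)) <;> simp
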